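-- pv_equiv track=rewrite | github.com/bayleaflet/sequence-processing-intro | DNA_Processing.py | count_variant_sites
-- ===== SOURCE A (Python) =====
-- def count_variant_sites(sequence_list):
--     variant_sites_count =0
--     sequence_length = len(sequence_list[0])
--     for i in range(sequence_length):
--         # Creates a list of current_positions containing ith character for each
--         # sequence in sequence_list. Then extracts character at position i in
--         # each sequence.
--         current_positions = [seq[i] for seq in sequence_list]
--         if len(set(current_positions)) > 1:
--             variant_sites_count += 1
--     return variant_sites_count
-- ===== SOURCE B (Python) =====
-- def count_variant_sites(sequence_list):
--     first = sequence_list[0]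
--     variant = [False] * len(first)
--     for seq in sequence_list[1:]:
--         variant = [v or a != b for v, a, b in zip(variant, first, seq)]
--     return sum(variant)
-- ===== Notes on version B (the rewrite author's own statement) =====
-- stated objective: alternative
-- what changed: A transposes: for each column it rebuilds the whole character list and a fresh set; B makes a single row-outer pass maintaining one per-column 'is variant' boolean vector (comparing against the first sequence), then sums it - no sets and no per-column list construction.
-- outside the precondition, e.g. on count_variant_sites([]): A raises IndexError, B raises IndexError; on count_variant_sites(['AB', 'A']): A raises IndexError, B returns 0
import Mathlib
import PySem

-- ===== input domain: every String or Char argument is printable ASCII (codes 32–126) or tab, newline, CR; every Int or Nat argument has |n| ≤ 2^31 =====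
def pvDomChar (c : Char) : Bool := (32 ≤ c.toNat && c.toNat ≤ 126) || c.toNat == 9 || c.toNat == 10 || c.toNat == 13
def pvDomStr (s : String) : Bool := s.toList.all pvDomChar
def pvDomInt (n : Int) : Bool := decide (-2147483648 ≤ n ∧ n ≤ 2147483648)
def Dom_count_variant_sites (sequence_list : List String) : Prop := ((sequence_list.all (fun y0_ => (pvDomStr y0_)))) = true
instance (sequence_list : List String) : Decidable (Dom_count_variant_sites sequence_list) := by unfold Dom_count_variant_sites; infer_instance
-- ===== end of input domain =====

-- B replaces A's column-outer pass (one set built per column) by a single row-outer pass over the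
-- other sequences that updates a per-column "is variant" boolean vector; same count, no sets.

-- ===== PORT A =====
def count_variant_sites (sequence_list : List String) : Int :=
  let variant_sites_count : Int := 0
  let sequence_length : Int := PySem.Str.len ((PySem.List.pyGet? sequence_list 0).getD "")
  (PySem.List.pyRange 0 sequence_length 1).foldl
    (fun acc i =>
      let current_positions : List Char :=
        sequence_list.map (fun seq => (PySem.Str.pyGet? seq i).getD ' ')
      if 1 < PySem.Set.len (PySem.Set.ofList current_positions) then acc + 1 else acc)
    variant_sites_count

-- ===== PORT B =====
def count_variant_sites_alt (sequence_list : List String) : Int :=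
  let first := (PySem.List.pyGet? sequence_list 0).getD ""
  let variant0 : List Bool := List.replicate first.toList.length false
  let variant :=
    (PySem.List.slice sequence_list (some 1) none).foldl
      (fun variant seq =>
        (variant.zip (first.toList.zip seq.toList)).map
          (fun t => t.1 || (t.2.1 != t.2.2)))
      variant0
  (variant.map (fun b => if b then (1 : Int) else 0)).sum

-- ===== PRECONDITION & SPEC =====
-- Pre_ excludes exactly the inputs where A raises IndexError: the empty list, and lists in which
-- some sequence is shorter than the first one.
def Pre_count_variant_sites (sequence_list : List String) : Prop :=
  sequence_list ≠ [] ∧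
  ∀ s ∈ sequence_list, (sequence_list.headD "").toList.length ≤ s.toList.length
instance (sequence_list : List String) : Decidable (Pre_count_variant_sites sequence_list) := by
  unfold Pre_count_variant_sites; infer_instance
def pvWitness_count_variant_sites : List String := ["ACGT", "ACCTA", "TCGT"]
def Spec_count_variant_sites (sequence_list : List String) (out : Int) : Prop := out = count_variant_sites_alt sequence_list
instance (sequence_list : List String) (out : Int) : Decidable (Spec_count_variant_sites sequence_list out) := by unfold Spec_count_variant_sites; infer_instance

-- ===== CLAIM (what is proved, stated in full; the proofs are below) =====
def Claim_equal_count_variant_sites : Prop := ∀ (sequence_list : List String), Dom_count_variant_sites sequence_list → Pre_count_variant_sites sequence_list → Spec_count_variant_sites sequence_list (count_variant_sites sequence_list)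

-- ===== LEMMAS AND PROOFS =====

theorem rowfold (fs : List Char) (rest : List String)
    (hlen : ∀ s ∈ rest, fs.length ≤ s.toList.length)
    (v : List Bool) (hv : v.length = fs.length) :
    (rest.foldl (fun variant seq =>
        (variant.zip (fs.zip seq.toList)).map (fun t => t.1 || (t.2.1 != t.2.2))) v).length
      = fs.length ∧
    ∀ i, i < fs.length →
      (rest.foldl (fun variant seq =>
          (variant.zip (fs.zip seq.toList)).map (fun t => t.1 || (t.2.1 != t.2.2))) v).getD i false
        = (v.getD i false || rest.any (fun s => fs.getD i ' ' != s.toList.getD i ' ')) := by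
  induction rest generalizing v with
  | nil => simp [hv]
  | cons s rest ih =>
    have hs : fs.length ≤ s.toList.length := hlen s (by simp)
    have hlen' : ∀ t ∈ rest, fs.length ≤ t.toList.length := fun t ht => hlen t (by simp [ht])
    have hv' : ((v.zip (fs.zip s.toList)).map (fun t => t.1 || (t.2.1 != t.2.2))).length = fs.length := by
      simp only [List.length_map, List.length_zip, hv]; omega
    obtain ⟨hL, hG⟩ := ih hlen' _ hv'
    refine ⟨by simpa using hL, fun i hi => ?_⟩
    rw [List.foldl_cons, hG i hi]
    have hiv : i < v.length := by omega
    have his : i < s.toList.length := by omega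
    have hstep : ((v.zip (fs.zip s.toList)).map (fun t => t.1 || (t.2.1 != t.2.2))).getD i false
        = (v.getD i false || (fs.getD i ' ' != s.toList.getD i ' ')) := by
      rw [List.getD_eq_getElem _ _ (by omega), List.getD_eq_getElem _ _ hiv,
          List.getD_eq_getElem _ _ hi, List.getD_eq_getElem _ _ his]
      simp
    rw [hstep]
    simp [Bool.or_assoc]

theorem setlen_cons (c : Char) (cs : List Char) :
    (1 < PySem.Set.len (PySem.Set.ofList (c :: cs))) ↔ ∃ y ∈ cs, y ≠ c := by
  rw [PySem.Set.ofList_cons]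
  have hmem : ∀ y, y ∈ PySem.Set.discard (PySem.Set.ofList cs) c ↔ y ∈ cs ∧ y ≠ c := by
    intro y; rw [PySem.Set.mem_discard, PySem.Set.mem_ofList]
  constructor
  · intro h
    rcases hd : PySem.Set.discard (PySem.Set.ofList cs) c with _ | ⟨y, ys⟩
    · simp [PySem.Set.len, hd] at h
    · exact ⟨y, ((hmem y).1 (by simp [hd])).1, ((hmem y).1 (by simp [hd])).2⟩
  · rintro ⟨y, hy, hyc⟩
    have : y ∈ PySem.Set.discard (PySem.Set.ofList cs) c := (hmem y).2 ⟨hy, hyc⟩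
    rcases hd : PySem.Set.discard (PySem.Set.ofList cs) c with _ | ⟨z, zs⟩
    · rw [hd] at this; simp at this
    · simp [PySem.Set.len]

theorem main_eq (f : String) (rest : List String)
    (hlen : ∀ s ∈ rest, f.toList.length ≤ s.toList.length) :
    count_variant_sites (f :: rest) = count_variant_sites_alt (f :: rest) := by
  unfold count_variant_sites count_variant_sites_alt
  simp only [PySem.List.pyGet?_zero_cons, Option.getD_some, PySem.List.slice_from_one,
    List.tail_cons]
  rw [show PySem.Str.len f = ((f.toList.length : Nat) : Int) by simp]
  rw [PySem.List.pyRange_zero_natCast, PySem.List.foldl_ite_add_one]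
  -- B side: characterize the final boolean vector
  obtain ⟨hL, hG⟩ := rowfold f.toList rest hlen
      (List.replicate f.toList.length false) (by simp)
  set w := rest.foldl (fun variant seq =>
      (variant.zip (f.toList.zip seq.toList)).map (fun t => t.1 || (t.2.1 != t.2.2)))
      (List.replicate f.toList.length false) with hw
  have hwe : w = (List.range f.toList.length).map
      (fun i => rest.any (fun s => f.toList.getD i ' ' != s.toList.getD i ' ')) := by
    apply List.ext_getElem (by simp [hL])
    intro i h1 h2
    have hi : i < f.toList.length := by simpa using h2
    have := hG i hi
    rw [List.getD_eq_getElem _ _ h1] at this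
    simp only [List.getElem_map, List.getElem_range]
    rw [this]
    simp
  rw [hwe, List.map_map]
  simp only [Function.comp_def]
  rw [PySem.List.sum_map_ite_one_zero, List.countP_map]
  simp only [Function.comp_def, zero_add]
  congr 1
  apply List.countP_congr
  intro i hi
  have hi' : i < f.toList.length := List.mem_range.mp hi
  rw [show ((f :: rest).map (fun seq => (PySem.Str.pyGet? seq (i : Int)).getD ' '))
        = (f.toList.getD i ' ') :: rest.map (fun s => s.toList.getD i ' ') by
    simp [List.getD]]
  simp only [decide_eq_true_eq, List.any_eq_true]
  rw [setlen_cons]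
  constructor
  · rintro ⟨y, hy, hyc⟩
    obtain ⟨s, hs, rfl⟩ := List.mem_map.mp hy
    exact ⟨s, hs, by simpa [bne_iff_ne] using (Ne.symm hyc)⟩
  · rintro ⟨s, hs, hne⟩
    refine ⟨s.toList.getD i ' ', List.mem_map.mpr ⟨s, hs, rfl⟩, ?_⟩
    have := bne_iff_ne.mp hne
    exact Ne.symm this

-- ===== VERDICT (by name: the statement is the Claim_ definition above) =====
theorem count_variant_sites_spec : Claim_equal_count_variant_sites := by
  intro l _ hp
  unfold Spec_count_variant_sites
  obtain ⟨hne, hlen⟩ := hp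
  match l with
  | [] => exact absurd rfl hne
  | f :: rest =>
    exact main_eq f rest (fun s hs => by simpa using hlen s (List.mem_cons_of_mem f hs))
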